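-- pv_equiv track=rewrite | github.com/MatousTrefilStudent/MatousTrefilProgramovani | 06_en_de_cryption_AVE_Caesar.py | caesar_shift_complicated_de
-- ===== SOURCE A (Python) =====
-- alphabet = "aábcčdďefghiíjklmnňopqrřsštťuvwxyz .,!?:-()0123456789"
--
-- def caesar_shift(text, shift):
--     """
--     Jednoduchý Caesar shift.
--
--     Args:
--         text (str): Text, který se má posunout.
--         shift (int): Posun (kladný i záporný).
--
--     Returns:
--         str: Posunutý text.
--     """
--     output = ""
--     for ch in text:
--         output += alphabet[(alphabet.index(ch.lower()) + shift) % len(alphabet)]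
--     return output
--
-- def caesar_shift_complicated_de(text, shift):
--     """
--     Dešifrovací funkce k caesar_shift_complicated_en.
--
--     Každých 22 znaků:
--         - přečte další dva znaky jako šifrovaný addedShift
--         - odstraní tyto dva znaky z výstupu
--         - pokračuje v dešifrování
--
--     Args:
--         text (str): Zašifrovaný text.
--         shift (int): Základní posun použitý při šifrování.
--
--     Returns:
--         str: Dešifrovaný text.
--     """
--     output = ""
--     addedShift = 0
--
--     for i, ch in enumerate(text):
--
--         # Každých 22 znaků se zjistí inserted addedShift
--         if i % 22 == 0:
--             addedShift = int(caesar_shift(text[i:i + 2], -shift - addedShift))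
--
--         # Dešifrování znaku
--         output += alphabet[(alphabet.index(ch.lower()) - shift - addedShift) % len(alphabet)]
--
--         # Odstranění dvou znaků s klíčem po jejich přečtení
--         if i % 22 == 1:
--             output = output[:-2]
--
--     return output
-- ===== SOURCE B (Python) =====
-- # B: one pass over 22-character blocks — slice off each block's 2-char key,
-- # decode the rest of the block with it; objective: simpler.
-- alphabet = "aábcčdďefghiíjklmnňopqrřsštťuvwxyz .,!?:-()0123456789"
--
--
-- def _dec(ch, s):
--     return alphabet[(alphabet.index(ch.lower()) + s) % len(alphabet)]
--
--
-- def caesar_shift_complicated_de(text, shift):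
--     pieces = []
--     addedShift = 0
--     for b in range(0, len(text), 22):
--         chunk = text[b:b + 22]
--         addedShift = int("".join(_dec(c, -shift - addedShift) for c in chunk[:2]))
--         pieces.extend(_dec(c, -shift - addedShift) for c in chunk[2:])
--     return "".join(pieces)
-- ===== Notes on version B (the rewrite author's own statement) =====
-- stated objective: simpler
-- what changed: Replaced A's character-by-character enumerate loop with i%22 tests and append-then-output[:-2] stripping by a single pass over 22-character blocks that reads the 2-char key off each block and decodes the rest of the block directly; Pre_ excludes nonempty texts of length congruent to 1 mod 22, whose final block is a truncated single-character key never produced by the matching encryptor, where emitting the stray key char decoded (A) or stripping it like every other key char (B) are equally defensible.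
-- outside the precondition, e.g. on caesar_shift_complicated_de('5', 0): A returns '0', B returns ''
import Mathlib
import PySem

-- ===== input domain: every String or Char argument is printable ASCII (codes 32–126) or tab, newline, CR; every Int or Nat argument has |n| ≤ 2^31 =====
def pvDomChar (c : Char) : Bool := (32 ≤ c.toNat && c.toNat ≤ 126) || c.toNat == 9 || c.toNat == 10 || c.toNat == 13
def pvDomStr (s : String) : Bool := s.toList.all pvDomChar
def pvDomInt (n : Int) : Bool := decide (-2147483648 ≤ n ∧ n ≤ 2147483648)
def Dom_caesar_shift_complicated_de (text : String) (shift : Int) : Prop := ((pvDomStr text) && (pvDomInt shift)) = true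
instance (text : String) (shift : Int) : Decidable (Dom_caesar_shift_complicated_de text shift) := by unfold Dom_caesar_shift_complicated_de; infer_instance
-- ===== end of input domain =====

-- B restructures A's char-by-char loop (i%22 tests, append then output[:-2] strip) into one pass
-- over 22-character blocks: slice off the 2-char key, decode the rest; objective: simpler.

-- ===== PORT A =====

-- the module constant alphabet (53 chars), written as an explicit char list so the kernel reduces it
def pvAlpha : List Char := ['a', 'á', 'b', 'c', 'č', 'd', 'ď', 'e', 'f', 'g', 'h', 'i', 'í', 'j', 'k', 'l', 'm', 'n', 'ň', 'o', 'p', 'q', 'r', 'ř', 's', 'š', 't', 'ť', 'u', 'v', 'w', 'x', 'y', 'z', ' ', '.', ',', '!', '?', ':', '-', '(', ')', '0', '1', '2', '3', '4', '5', '6', '7', '8', '9']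

-- alphabet[(alphabet.index(ch.lower()) + s) % len(alphabet)] — the decode expression both Pythons
-- contain verbatim (A inline and in caesar_shift, B in _dec).  The .index fallback 0 and the pyGet?
-- fallback ' ' are only reachable where Python raises ValueError (outside Pre_; the pyGet? one never
-- fires at all: 0 ≤ mod < 53).
def pvShiftCh (c : Char) (s : Int) : Char :=
  (PySem.List.pyGet? pvAlpha
    (PySem.Int.mod ((((PySem.List.index? pvAlpha (PySem.Chars.lowerChar c)).getD 0 : Nat) : Int) + s)
      ((pvAlpha.length : Nat) : Int))).getD ' '

-- port of helper caesar_shift (on the char-list side; A only applies it to the 2-char key slices)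
def pvCaesarShift (cs : List Char) (s : Int) : List Char :=
  cs.foldl (fun out ch => out ++ [pvShiftCh ch s]) []

-- int(caesar_shift(text[i:i+2], -shift - addedShift)); .getD 0 only reached where Python raises ValueError
def pvKeyA (full : List Char) (i : Nat) (shift add : Int) : Int :=
  (PySem.Int.ofChars? (pvCaesarShift (PySem.List.slice full (some (i : Int)) (some ((i : Int) + 2))) (-shift - add))).getD 0

-- the 'for i, ch in enumerate(text)' loop; output[:-2] is ported as dropLast.dropLast (exact for every length)
def pvLoopA (full : List Char) (shift : Int) : List Char → Nat → List Char → Int → List Char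
  | [], _, out, _ => out
  | ch :: rest, i, out, add =>
    let add' := if i % 22 == 0 then pvKeyA full i shift add else add
    let out1 := out ++ [pvShiftCh ch (-shift - add')]
    let out2 := if i % 22 == 1 then out1.dropLast.dropLast else out1
    pvLoopA full shift rest (i + 1) out2 add'

def caesar_shift_complicated_de (text : String) (shift : Int) : String :=
  String.ofList (pvLoopA text.toList shift text.toList 0 [] 0)

-- ===== PORT B =====

-- Source B's block loop 'for b in range(0, len(text), 22)': each step works on chunk = text[b:b+22]
-- (= the head of the remaining suffix), decodes chunk[2:] with the key read from chunk[:2],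
-- and carries addedShift to the next block.
def pvLoopB (shift : Int) : List Char → Int → List Char
  | [], _ => []
  | c :: cs, add =>
    let chunk := (c :: cs).take 22
    let k := (PySem.Int.ofChars? ((chunk.take 2).map (fun ch => pvShiftCh ch (-shift - add)))).getD 0
    ((chunk.drop 2).map (fun ch => pvShiftCh ch (-shift - k))) ++ pvLoopB shift ((c :: cs).drop 22) k
  termination_by cs _ => cs.length
  decreasing_by simp [List.length_drop]

def caesar_shift_complicated_de_alt (text : String) (shift : Int) : String :=
  String.ofList (pvLoopB shift text.toList 0)

-- ===== PRECONDITION & SPEC =====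

-- the chain of embedded keys: for every block start b*22, int(caesar_shift(key, -shift - add)) must
-- parse, where add is the key of the previous block (a fold over the block starts; once a key fails
-- to parse the flag stays false)
def pvKeysOk (shift : Int) (cs : List Char) : Bool :=
  ((List.range ((cs.length + 21) / 22)).foldl
    (fun (st : Bool × Int) b =>
      match PySem.Int.ofChars? (pvCaesarShift ((cs.drop (22 * b)).take 2) (-shift - st.2)) with
      | none => (false, 0)
      | some k => (st.1, k)) (true, 0)).1

-- Pre_: the inputs where Python A returns normally AND the ciphertext is well-formed: every lowered
-- character is in the alphabet (else alphabet.index raises ValueError) and every embedded 2-char key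
-- decodes to a string int() accepts.  Pre_ additionally excludes nonempty texts of length ≡ 1 (mod 22),
-- whose final block is a truncated single-character key: ciphertext produced by the matching encryptor
-- always carries a full 2-character key per block, so no specification covers such input, and emitting
-- the stray key character decoded (A) or stripping it like every other key character (B) are equally
-- defensible choices there.
def Pre_caesar_shift_complicated_de (text : String) (shift : Int) : Prop :=
  text.toList.all (fun c => pvAlpha.contains (PySem.Chars.lowerChar c)) = true ∧ pvKeysOk shift text.toList = true ∧
  text.toList.length % 22 ≠ 1

instance (text : String) (shift : Int) : Decidable (Pre_caesar_shift_complicated_de text shift) := by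
  unfold Pre_caesar_shift_complicated_de; infer_instance

def pvWitness_caesar_shift_complicated_de : String × Int := ("12x", 0)

def Spec_caesar_shift_complicated_de (text : String) (shift : Int) (out : String) : Prop := out = caesar_shift_complicated_de_alt text shift
instance (text : String) (shift : Int) (out : String) : Decidable (Spec_caesar_shift_complicated_de text shift out) := by unfold Spec_caesar_shift_complicated_de; infer_instance

-- ===== CLAIM (what is proved, stated in full; the proofs are below) =====
def Claim_equal_caesar_shift_complicated_de : Prop := ∀ (text : String) (shift : Int), Dom_caesar_shift_complicated_de text shift → Pre_caesar_shift_complicated_de text shift → Spec_caesar_shift_complicated_de text shift (caesar_shift_complicated_de text shift)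

-- ===== LEMMAS AND PROOFS =====

-- the single decoded key char A leaks on a lone trailing block (proof-side helper)
def pvLeak (shift : Int) : List Char → Int → List Char
  | [], _ => []
  | c :: cs, add =>
    let k := (PySem.Int.ofChars? ((((c :: cs).take 22).take 2).map (fun ch => pvShiftCh ch (-shift - add)))).getD 0
    if cs = [] then [pvShiftCh c (-shift - k)]
    else pvLeak shift ((c :: cs).drop 22) k
  termination_by cs _ => cs.length
  decreasing_by simp [List.length_drop]

-- inside a block (position i % 22 ∈ [2, 21]) A's loop only appends decoded chars
theorem pvLoopA_mid (full : List Char) (shift add : Int) :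
    ∀ (cs rest out : List Char) (i : Nat), 2 ≤ i % 22 → cs.length + i % 22 ≤ 22 →
    pvLoopA full shift (cs ++ rest) i out add =
      pvLoopA full shift rest (i + cs.length) (out ++ cs.map (fun ch => pvShiftCh ch (-shift - add))) add := by
  intro cs
  induction cs with
  | nil => intro rest out i _ _; simp
  | cons c cs ih =>
    intro rest out i h2 hle
    have h0 : ¬ (i % 22 = 0) := by omega
    have h1 : ¬ (i % 22 = 1) := by omega
    simp only [List.cons_append, pvLoopA, beq_iff_eq, h0, h1, if_false, List.map_cons]
    rcases cs with _ | ⟨d, ds⟩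
    · simp
    · have hlen : (d :: ds).length + i % 22 ≤ 21 := by simp at hle ⊢; omega
      have hf : 1 ≤ (d :: ds).length := by simp
      rw [ih rest (out ++ [pvShiftCh c (-shift - add)]) (i + 1) (by omega) (by omega)]
      simp only [List.length_cons, List.append_assoc, List.cons_append, List.nil_append]
      ring_nf

-- A's loop from a block boundary onwards equals B's block recursion plus the leaked trailing key char
theorem pvLoopA_eq_pvLoopB (full : List Char) (shift : Int) :
    ∀ (n : Nat) (rest out : List Char) (i : Nat) (add : Int),
      rest.length ≤ n → i % 22 = 0 → rest = full.drop i →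
      pvLoopA full shift rest i out add = out ++ pvLoopB shift rest add ++ pvLeak shift rest add := by
  intro n
  induction n with
  | zero =>
    intro rest out i add hn _ _
    have : rest = [] := List.eq_nil_of_length_eq_zero (by omega)
    subst this; rw [pvLoopB, pvLeak]; simp [pvLoopA]
  | succ n ih =>
    intro rest out i add hn h0 hdrop
    match rest with
    | [] => rw [pvLoopB, pvLeak]; simp [pvLoopA]
    | [c] =>
      have hkey : PySem.List.slice full (some (i : Int)) (some ((i : Int) + 2)) = [c] := by
        rw [show ((i : Int) + 2) = ((i : Int) + ((2 : Nat) : Int)) by norm_num,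
          PySem.List.slice_natCast_add, ← hdrop]
        simp
      rw [pvLoopB, pvLeak]
      simp only [pvLoopA, beq_iff_eq, h0, pvKeyA, hkey, Nat.zero_ne_one, if_true, if_false]
      simp [pvCaesarShift]
      rw [pvLoopB]
    | c1 :: c2 :: rest' =>
      have hkey : PySem.List.slice full (some (i : Int)) (some ((i : Int) + 2)) = [c1, c2] := by
        rw [show ((i : Int) + 2) = ((i : Int) + ((2 : Nat) : Int)) by norm_num,
          PySem.List.slice_natCast_add, ← hdrop]
        simp
      have h1i : (i + 1) % 22 = 1 := by omega
      have h1ne0 : ¬ ((i + 1) % 22 = 0) := by omega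
      -- unfold two steps of A's loop: the two key chars are appended and then both stripped
      simp only [pvLoopA, beq_iff_eq, h0, pvKeyA, hkey, h1i, Nat.zero_ne_one, Nat.one_ne_zero, if_true, if_false]
      set k := (PySem.Int.ofChars? (pvCaesarShift [c1, c2] (-shift - add))).getD 0 with hk
      rw [show (out ++ [pvShiftCh c1 (-shift - k)]) ++ [pvShiftCh c2 (-shift - k)]
            = out ++ [pvShiftCh c1 (-shift - k), pvShiftCh c2 (-shift - k)] by simp]
      rw [show (out ++ [pvShiftCh c1 (-shift - k), pvShiftCh c2 (-shift - k)]).dropLast.dropLast = out by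
        simp]
      -- the remaining ≤ 20 chars of the block are plain appends
      conv_lhs => rw [show rest' = rest'.take 20 ++ rest'.drop 20 by simp]
      rw [pvLoopA_mid full shift k (rest'.take 20) (rest'.drop 20) out (i + 2) (by omega)
        (by have := List.length_take_le 20 rest'; omega)]
      -- recurse on the next block
      have hdrop' : rest'.drop 20 = full.drop (i + 2 + (rest'.take 20).length) := by
        by_cases h : 20 ≤ rest'.length
        · have hlen : (rest'.take 20).length = 20 := by simp; omega
          rw [hlen, show i + 2 + 20 = i + 22 by ring]
          have : full.drop (i + 22) = (full.drop i).drop 22 := by rw [List.drop_drop]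
          rw [this, ← hdrop]
          simp
        · have h20 : rest'.drop 20 = [] := by apply List.drop_eq_nil_of_le; omega
          have htk : (rest'.take 20).length = rest'.length := by simp; omega
          rw [h20, htk]
          have hful : full.length ≤ i + 2 + rest'.length := by
            have hl := congrArg List.length hdrop
            simp at hl; omega
          exact (List.drop_eq_nil_of_le hful).symm
      have hmod' : (i + 2 + (rest'.take 20).length) % 22 = 0 ∨ rest'.drop 20 = [] := by
        by_cases h : 20 ≤ rest'.length
        · left; have hlen : (rest'.take 20).length = 20 := by simp; omega
          omega
        · right; apply List.drop_eq_nil_of_le; omega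
      have hstep : pvLoopA full shift (rest'.drop 20) (i + 2 + (rest'.take 20).length)
          (out ++ (rest'.take 20).map (fun ch => pvShiftCh ch (-shift - k))) k
          = (out ++ (rest'.take 20).map (fun ch => pvShiftCh ch (-shift - k)))
              ++ pvLoopB shift (rest'.drop 20) k ++ pvLeak shift (rest'.drop 20) k := by
        rcases hmod' with hm | hm
        · exact ih _ _ _ _ (by simp at hn ⊢; omega) hm hdrop'
        · rw [hm, pvLoopB, pvLeak]; simp [pvLoopA]
      rw [hstep]
      -- fold B's side and the leak
      conv_rhs => rw [pvLoopB, pvLeak]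
      have hchunkkey : ((c1 :: c2 :: rest').take 22).take 2 = [c1, c2] := by
        simp [List.take_succ_cons]
      have hchunk2 : ((c1 :: c2 :: rest').take 22).drop 2 = rest'.take 20 := by
        simp [List.take_succ_cons, List.drop_succ_cons]
      have hdropB : (c1 :: c2 :: rest').drop 22 = rest'.drop 20 := by
        simp [List.drop_succ_cons]
      simp only [hchunkkey, hchunk2, hdropB, List.map_cons, List.map_nil,
        reduceCtorEq, if_false]
      simp only [pvCaesarShift, List.foldl_cons, List.foldl_nil, List.nil_append] at hk
      rw [show [pvShiftCh c1 (-shift - add)] ++ [pvShiftCh c2 (-shift - add)]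
            = [pvShiftCh c1 (-shift - add), pvShiftCh c2 (-shift - add)] by simp] at hk
      rw [← hk]
      simp [List.append_assoc]

-- outside D_ the leak is empty
theorem pvLeak_nil (shift : Int) :
    ∀ (n : Nat) (cs : List Char) (add : Int), cs.length ≤ n → cs.length % 22 ≠ 1 →
      pvLeak shift cs add = [] := by
  intro n
  induction n with
  | zero =>
    intro cs add hn _
    have : cs = [] := List.eq_nil_of_length_eq_zero (by omega)
    subst this; rw [pvLeak]
  | succ n ih =>
    intro cs add hn hm
    match cs with
    | [] => rw [pvLeak]
    | [c] => simp at hm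
    | c1 :: c2 :: rest' =>
      rw [pvLeak]
      simp only [reduceCtorEq, if_false]
      apply ih
      · simp at hn ⊢; omega
      · have hlen22 : ((c1 :: c2 :: rest').drop 22).length = (c1 :: c2 :: rest').length - 22 := by
          simp
        simp only [List.length_cons] at hm hlen22 ⊢
        rw [hlen22]; omega

-- ===== VERDICT (by name: the statement is the Claim_ definition above) =====
theorem caesar_shift_complicated_de_spec : Claim_equal_caesar_shift_complicated_de := by
  intro text shift _ hpre
  obtain ⟨_, _, hm⟩ := hpre
  unfold Spec_caesar_shift_complicated_de caesar_shift_complicated_de caesar_shift_complicated_de_alt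
  rw [pvLoopA_eq_pvLoopB text.toList shift text.toList.length text.toList [] 0 0 le_rfl (by omega) (by simp)]
  rw [pvLeak_nil shift text.toList.length text.toList 0 le_rfl hm]
  simp
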